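-- pv_equiv track=rewrite | github.com/r-cha/advent-of-code-2024 | day19.py | ways_to_make
-- ===== SOURCE A (Python) =====
-- def ways_to_make(design, patterns):
--     """Return the number of ways to make the design using the given patterns."""
--     n = len(design)
--     cache = [0] * (n + 1)
--     cache[0] = 1  # One way to compose an empty string
--
--     for i in range(1, n + 1):
--         for p in patterns:
--             plen = len(p)
--             if plen <= i and design[i - plen : i] == p:
--                 cache[i] += cache[i - plen]
--
--     return cache[n]
-- ===== SOURCE B (Python) =====
-- def ways_to_make(design, patterns):
--     """Return the number of ways to make the design using the given patterns."""
--     cnt = {}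
--     for p in patterns:
--         cnt[p] = cnt.get(p, 0) + 1
--     maxlen = 0
--     for p in patterns:
--         if len(p) > maxlen:
--             maxlen = len(p)
--     n = len(design)
--     cache = [1] + [0] * n
--     for i in range(1, n + 1):
--         total = 0
--         for L in range(1, min(i, maxlen) + 1):
--             c = cnt.get(design[i - L:i], 0)
--             if c:
--                 total += c * cache[i - L]
--         cache[i] = total
--     return cache[n]
-- ===== Notes on version B (the rewrite author's own statement) =====
-- stated objective: faster
-- what changed: B builds a dict of pattern multiplicities once and, at each position, scans only the candidate lengths 1..maxlen with a single lookup per length, instead of A's inner scan over the whole pattern list.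
-- outside the precondition, e.g. on ways_to_make('a', ['a', '']): A returns 2, B returns 1
import Mathlib
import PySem

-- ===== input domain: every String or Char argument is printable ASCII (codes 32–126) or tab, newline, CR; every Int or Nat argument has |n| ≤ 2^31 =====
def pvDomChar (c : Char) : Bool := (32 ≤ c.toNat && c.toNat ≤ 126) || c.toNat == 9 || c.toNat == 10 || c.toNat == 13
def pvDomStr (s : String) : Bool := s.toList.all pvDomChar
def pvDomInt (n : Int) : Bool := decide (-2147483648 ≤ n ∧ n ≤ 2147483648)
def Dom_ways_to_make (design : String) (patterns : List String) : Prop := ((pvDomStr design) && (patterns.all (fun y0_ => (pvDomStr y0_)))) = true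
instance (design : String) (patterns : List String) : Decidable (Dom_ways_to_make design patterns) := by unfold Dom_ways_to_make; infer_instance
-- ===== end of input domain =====

-- B replaces A's inner scan over all patterns by a dict of pattern counts, scanning only
-- the candidate lengths 1..maxlen at each position (objective: faster when patterns are many).

-- ===== PORT A =====
-- literal port of Source A; 'for i in range(1, n+1)' over the nonnegative indices is List.range' 1 n;
-- cache[i] = cache.getD i 0 (every index used is in range, so the default is never taken)
def ways_to_make (design : String) (patterns : List String) : Int :=
  let d := design.toList
  let n := d.length
  let cache0 : List Int := (List.replicate (n + 1) (0 : Int)).set 0 1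
  let cache := (List.range' 1 n).foldl (fun cache (i : Nat) =>
      patterns.foldl (fun cache p =>
          let plen := p.toList.length
          if plen ≤ i ∧ PySem.List.slice d (some ((i : Int) - (plen : Int))) (some (i : Int)) = p.toList
          then cache.set i (cache.getD i 0 + cache.getD (i - plen) 0)
          else cache) cache) cache0
  cache.getD n 0

-- ===== PORT B =====
-- literal port of Source B (same range/index conventions as the port of A)
def ways_to_make_alt (design : String) (patterns : List String) : Int :=
  let d := design.toList
  let cnt := patterns.foldl (fun cnt p => cnt.insert p.toList (cnt.getD p.toList 0 + 1))
      (PySem.Dict.empty : PySem.Dict (List Char) Int)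
  let maxlen := patterns.foldl (fun m p => if p.toList.length > m then p.toList.length else m) 0
  let n := d.length
  let cache := (List.range' 1 n).foldl (fun cache (i : Nat) =>
      let total := (List.range' 1 (min i maxlen)).foldl (fun total (L : Nat) =>
          let c := cnt.getD (PySem.List.slice d (some ((i : Int) - (L : Int))) (some (i : Int))) 0
          if c ≠ 0 then total + c * cache.getD (i - L) 0 else total) 0
      cache.set i total) ((1 : Int) :: List.replicate n 0)
  cache.getD n 0

-- ===== PRECONDITION & SPEC =====
-- Pre_ excludes pattern lists that contain the empty string while some nonempty pattern occurs
-- inside the design: with an empty tile the number of compositions is not well defined (A's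
-- 'cache[i] += cache[i]' then reads a half-updated cell, so A's value depends on where ''
-- sits in the list), a corner no caller would specify.
def Pre_ways_to_make (design : String) (patterns : List String) : Prop :=
  "" ∉ patterns ∨ ∀ p ∈ patterns, ¬ (p.toList ≠ [] ∧ p.toList <:+: design.toList)
instance (design : String) (patterns : List String) : Decidable (Pre_ways_to_make design patterns) := by unfold Pre_ways_to_make; infer_instance
def pvWitness_ways_to_make : String × List String := ("aabab", ["a", "b", "ab", "aab"])
def Spec_ways_to_make (design : String) (patterns : List String) (out : Int) : Prop := out = ways_to_make_alt design patterns
instance (design : String) (patterns : List String) (out : Int) : Decidable (Spec_ways_to_make design patterns out) := by unfold Spec_ways_to_make; infer_instance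

-- ===== CLAIM (what is proved, stated in full; the proofs are below) =====
def Claim_equal_ways_to_make : Prop := ∀ (design : String) (patterns : List String), Dom_ways_to_make design patterns → Pre_ways_to_make design patterns → Spec_ways_to_make design patterns (ways_to_make design patterns)

-- ===== LEMMAS AND PROOFS =====

-- the slice design[i-L:i] in drop/take form
def slN (d : List Char) (i L : Nat) : List Char := (d.drop (i - L)).take L

theorem slice_eq_slN (d : List Char) (i L : Nat) (h : L ≤ i) :
    PySem.List.slice d (some ((i : Int) - (L : Int))) (some (i : Int)) = slN d i L := by
  have h1 : (i : Int) - (L : Int) = ((i - L : Nat) : Int) := by omega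
  rw [h1, PySem.List.slice_natCast, slN]
  congr 1
  omega

theorem length_slN (d : List Char) (i L : Nat) (h1 : L ≤ i) (h2 : i ≤ d.length) :
    (slN d i L).length = L := by
  simp [slN]
  omega

theorem sum_single (L0 : Nat) (h : Nat → Int) : ∀ (LS : List Nat), LS.Nodup → L0 ∈ LS →
    (∀ L ∈ LS, L ≠ L0 → h L = 0) → (LS.map h).sum = h L0 := by
  intro LS
  induction LS with
  | nil => simp
  | cons a tl ih =>
    intro hnd hmem hz
    rcases List.mem_cons.mp hmem with rfl | htl
    · have : ∀ x ∈ tl.map h, x = 0 := by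
        intro x hx
        obtain ⟨L, hL, rfl⟩ := List.mem_map.mp hx
        exact hz L (List.mem_cons_of_mem _ hL) (fun hEq => (List.nodup_cons.mp hnd).1 (hEq ▸ hL))
      simp [List.sum_eq_zero this]
    · have ha : h a = 0 := hz a (List.mem_cons_self) (fun hEq => (List.nodup_cons.mp hnd).1 (hEq ▸ htl))
      simp [ha, ih (List.nodup_cons.mp hnd).2 htl
        (fun L hL hne => hz L (List.mem_cons_of_mem _ hL) hne)]

-- the heart: the per-position sum over all patterns equals the per-length grouped sum
theorem group_sum (d : List Char) (i m : Nat) (c : Nat → Int)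
    (hin : i ≤ d.length) :
    ∀ (ps : List (List Char)), (∀ p ∈ ps, p ≠ [] ∧ p.length ≤ m) →
    (ps.map (fun p => if p.length ≤ i ∧ slN d i p.length = p then c (i - p.length) else 0)).sum
      = ((List.range' 1 (min i m)).map (fun L => ((ps.count (slN d i L) : Int)) * c (i - L))).sum := by
  intro ps
  induction ps with
  | nil => simp
  | cons q tl ih =>
    intro hps
    obtain ⟨hq, hqm⟩ := hps q List.mem_cons_self
    have htl := ih (fun p hp => hps p (List.mem_cons_of_mem _ hp))
    have hcount : ∀ L, ((q :: tl).count (slN d i L) : Int)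
        = (tl.count (slN d i L) : Int) + (if slN d i L = q then 1 else 0) := by
      intro L
      rw [List.count_cons]
      by_cases h : slN d i L = q
      · simp [h]
      · have h' : ¬ q = slN d i L := fun e => h e.symm
        simp [h, h']
    have hlen : ∀ L ∈ List.range' 1 (min i m), (slN d i L).length = L := by
      intro L hL
      have := List.mem_range'_1.mp hL
      exact length_slN d i L (by omega) hin
    calc ((q :: tl).map (fun p => if p.length ≤ i ∧ slN d i p.length = p then c (i - p.length) else 0)).sum
        = (if q.length ≤ i ∧ slN d i q.length = q then c (i - q.length) else 0)
          + ((List.range' 1 (min i m)).map (fun L => ((tl.count (slN d i L) : Int)) * c (i - L))).sum := by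
          rw [List.map_cons, List.sum_cons, htl]
      _ = ((List.range' 1 (min i m)).map (fun L => ((tl.count (slN d i L) : Int)) * c (i - L))).sum
          + ((List.range' 1 (min i m)).map (fun L => (if slN d i L = q then 1 else 0) * c (i - L))).sum := by
          have hone : ((List.range' 1 (min i m)).map (fun L => (if slN d i L = q then 1 else 0) * c (i - L))).sum
              = (if q.length ≤ i ∧ slN d i q.length = q then c (i - q.length) else 0) := by
            by_cases hle : q.length ≤ i ∧ slN d i q.length = q
            · rw [if_pos hle]
              have hq1 : 1 ≤ q.length := by
                cases q with
                | nil => exact absurd rfl hq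
                | cons _ _ => simp
              have hmem : q.length ∈ List.range' 1 (min i m) := by
                rw [List.mem_range'_1]; omega
              rw [sum_single q.length (fun L => (if slN d i L = q then 1 else 0) * c (i - L))
                  (List.range' 1 (min i m)) (List.nodup_range') hmem ?_]
              · simp [hle.2]
              · intro L hL hne
                have : slN d i L ≠ q := by
                  intro hEq
                  exact hne (by rw [← hlen L hL, hEq])
                simp [this]
            · rw [if_neg hle]
              apply List.sum_eq_zero
              intro x hx
              obtain ⟨L, hL, rfl⟩ := List.mem_map.mp hx
              have hLr := List.mem_range'_1.mp hL
              have : slN d i L ≠ q := by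
                intro hEq
                have hLlen : L = q.length := by rw [← hEq, hlen L hL]
                exact hle ⟨by omega, by rw [← hLlen]; exact hEq⟩
              simp [this]
          rw [hone]; ring
      _ = ((List.range' 1 (min i m)).map (fun L => (((q :: tl).count (slN d i L) : Int)) * c (i - L))).sum := by
          rw [← PySem.List.sum_map_add_int]
          apply congrArg
          apply List.map_congr_left
          intro L _
          rw [hcount L]; ring

-- helper names for the two loop bodies (definitionally the ports' lambdas)
def cntF (ps : List String) : PySem.Dict (List Char) Int :=
  ps.foldl (fun cnt p => cnt.insert p.toList (cnt.getD p.toList 0 + 1)) PySem.Dict.empty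

def maxlenF (ps : List String) : Nat :=
  ps.foldl (fun m p => if p.toList.length > m then p.toList.length else m) 0

def stepA (d : List Char) (ps : List String) (cache : List Int) (i : Nat) : List Int :=
  ps.foldl (fun cache p =>
      let plen := p.toList.length
      if plen ≤ i ∧ PySem.List.slice d (some ((i : Int) - (plen : Int))) (some (i : Int)) = p.toList
      then cache.set i (cache.getD i 0 + cache.getD (i - plen) 0)
      else cache) cache

def totalB (d : List Char) (ps : List String) (cache : List Int) (i : Nat) : Int :=
  (List.range' 1 (min i (maxlenF ps))).foldl (fun total (L : Nat) =>
      let c := (cntF ps).getD (PySem.List.slice d (some ((i : Int) - (L : Int))) (some (i : Int))) 0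
      if c ≠ 0 then total + c * cache.getD (i - L) 0 else total) 0

def stepB (d : List Char) (ps : List String) (cache : List Int) (i : Nat) : List Int :=
  cache.set i (totalB d ps cache i)

theorem cnt_getD (ps : List String) (s : List Char) :
    (cntF ps).getD s 0 = (((ps.map String.toList).count s : Nat) : Int) := by
  unfold cntF
  rw [← List.foldl_map (f := String.toList)
      (g := fun (cnt : PySem.Dict (List Char) Int) (x : List Char) => cnt.insert x (cnt.getD x 0 + 1))
      (l := ps) (init := PySem.Dict.empty),
    PySem.Dict.getD_foldl_insert_add_one]
  simp

theorem maxlen_ge (ps : List String) : ∀ p ∈ ps, p.toList.length ≤ maxlenF ps := by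
  have h : maxlenF ps = ps.foldl (fun acc y => max acc y.toList.length) 0 := by
    unfold maxlenF
    apply PySem.List.foldl_congr_mem'
    intro x _ acc
    by_cases h : x.toList.length > acc
    · rw [if_pos h]
      exact (Nat.max_eq_right (Nat.le_of_lt h)).symm
    · rw [if_neg h]
      exact (Nat.max_eq_left (by omega)).symm
  rw [h]
  exact (PySem.List.le_foldl_max_nat ps (fun p => p.toList.length) 0).2

-- A's inner loop is one set of index i to the accumulated sum
theorem innerA (d : List Char) (i : Nat) (hi : 1 ≤ i) :
    ∀ (ps : List (List Char)) (cache : List Int), (∀ p ∈ ps, p ≠ []) → i < cache.length →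
    ps.foldl (fun cache p =>
        if p.length ≤ i ∧ PySem.List.slice d (some ((i : Int) - (p.length : Int))) (some (i : Int)) = p
        then cache.set i (cache.getD i 0 + cache.getD (i - p.length) 0) else cache) cache
    = cache.set i (cache.getD i 0 +
        (ps.map (fun p => if p.length ≤ i ∧ slN d i p.length = p then cache.getD (i - p.length) 0 else 0)).sum) := by
  intro ps
  induction ps with
  | nil =>
    intro cache _ hlt
    rw [List.foldl_nil, List.map_nil, List.sum_nil, add_zero,
      List.getD_eq_getElem _ _ hlt, List.set_getElem_self]
  | cons q tl ih =>
    intro cache hne hlt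
    have hq := hne q List.mem_cons_self
    have hq1 : 1 ≤ q.length := List.length_pos_iff.mpr hq
    rw [List.foldl_cons, List.map_cons, List.sum_cons]
    by_cases hc : q.length ≤ i ∧ PySem.List.slice d (some ((i : Int) - (q.length : Int))) (some (i : Int)) = q
    · have hcN : q.length ≤ i ∧ slN d i q.length = q := ⟨hc.1, by rw [← slice_eq_slN d i q.length hc.1]; exact hc.2⟩
      rw [if_pos hc, if_pos hcN]
      rw [ih (cache.set i (cache.getD i 0 + cache.getD (i - q.length) 0))
          (fun p hp => hne p (List.mem_cons_of_mem _ hp)) (by simpa using hlt)]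
      rw [List.set_set]
      have hgd : (cache.set i (cache.getD i 0 + cache.getD (i - q.length) 0)).getD i 0
          = cache.getD i 0 + cache.getD (i - q.length) 0 := by
        rw [List.getD_eq_getElem _ _ (by simpa using hlt), List.getElem_set_self]
      have hsum : ∀ p ∈ tl, (if p.length ≤ i ∧ slN d i p.length = p
            then (cache.set i (cache.getD i 0 + cache.getD (i - q.length) 0)).getD (i - p.length) 0 else 0)
          = (if p.length ≤ i ∧ slN d i p.length = p then cache.getD (i - p.length) 0 else 0) := by
        intro p hp
        by_cases hcp : p.length ≤ i ∧ slN d i p.length = p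
        · rw [if_pos hcp, if_pos hcp]
          have hp1 : 1 ≤ p.length := List.length_pos_iff.mpr (hne p (List.mem_cons_of_mem _ hp))
          have hnei : i ≠ i - p.length := by omega
          simp only [List.getD, List.getElem?_set_ne hnei]
        · rw [if_neg hcp, if_neg hcp]
      rw [hgd, List.map_congr_left hsum]
      congr 1
      ring
    · have hcN : ¬ (q.length ≤ i ∧ slN d i q.length = q) := by
        intro h
        exact hc ⟨h.1, by rw [slice_eq_slN d i q.length h.1]; exact h.2⟩
      rw [if_neg hc, if_neg hcN, ih cache (fun p hp => hne p (List.mem_cons_of_mem _ hp)) hlt]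
      congr 1
      ring

-- B's inner loop is the grouped sum
theorem innerB_sum (d : List Char) (ps : List String) (cache : List Int) (i : Nat) :
    totalB d ps cache i
      = ((List.range' 1 (min i (maxlenF ps))).map
          (fun (L : Nat) => (((ps.map String.toList).count
              (PySem.List.slice d (some ((i : Int) - (L : Int))) (some (i : Int))) : Nat) : Int)
            * cache.getD (i - L) 0)).sum := by
  unfold totalB
  rw [PySem.List.foldl_congr_mem' _ _
      (fun total (L : Nat) => total + (cntF ps).getD (PySem.List.slice d (some ((i : Int) - (L : Int))) (some (i : Int))) 0 * cache.getD (i - L) 0) _ ?_]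
  · rw [PySem.List.foldl_add]
    simp [cnt_getD]
  · intro L _ total
    by_cases h : (cntF ps).getD (PySem.List.slice d (some ((i : Int) - (L : Int))) (some (i : Int))) 0 ≠ 0
    · simp [h]
    · simp only [ne_eq, not_not] at h
      simp [h]

theorem step_eq (d : List Char) (ps : List String) (i : Nat) (cache : List Int)
    (hi : 1 ≤ i) (hiN : i ≤ d.length) (hlt : i < cache.length)
    (hzero : cache.getD i 0 = 0) (hne : ∀ p ∈ ps, p.toList ≠ []) :
    stepA d ps cache i = stepB d ps cache i := by
  unfold stepA stepB
  show List.foldl (fun cache p =>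
      if p.toList.length ≤ i ∧ PySem.List.slice d (some ((i : Int) - (p.toList.length : Int))) (some (i : Int)) = p.toList
      then cache.set i (cache.getD i 0 + cache.getD (i - p.toList.length) 0)
      else cache) cache ps = _
  rw [← List.foldl_map (f := String.toList)
      (g := fun (cache : List Int) (p : List Char) =>
        if p.length ≤ i ∧ PySem.List.slice d (some ((i : Int) - (p.length : Int))) (some (i : Int)) = p
        then cache.set i (cache.getD i 0 + cache.getD (i - p.length) 0)
        else cache) (l := ps) (init := cache),
    innerA d i hi (ps.map String.toList) cache
      (by intro p hp; obtain ⟨q, hq, rfl⟩ := List.mem_map.mp hp; exact hne q hq) hlt]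
  rw [hzero, zero_add]
  congr 1
  rw [innerB_sum]
  have hmc : ∀ (L : Nat), L ∈ List.range' 1 (min i (maxlenF ps)) →
      ((((ps.map String.toList).count (PySem.List.slice d (some ((i : Int) - (L : Int))) (some (i : Int))) : Nat) : Int) * cache.getD (i - L) 0)
      = ((((ps.map String.toList).count (slN d i L) : Nat) : Int) * cache.getD (i - L) 0) := by
    intro L hL
    have hLr := List.mem_range'_1.mp hL
    rw [slice_eq_slN d i L (by omega)]
  rw [List.map_congr_left hmc]
  exact group_sum d i (maxlenF ps) (fun j => cache.getD j 0) hiN (ps.map String.toList)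
    (by
      intro p hp
      obtain ⟨q, hq, rfl⟩ := List.mem_map.mp hp
      exact ⟨hne q hq, maxlen_ge ps q hq⟩)

-- outer loop: starting from a cache whose entries at the unprocessed indices are 0, the loops agree
theorem outer_eq (d : List Char) (ps : List String) (hne : ∀ p ∈ ps, p.toList ≠ []) :
    ∀ (k i : Nat) (cache : List Int), 1 ≤ i → i + k ≤ d.length + 1 → cache.length = d.length + 1 →
    (∀ j, i ≤ j → j ≤ d.length → cache.getD j 0 = 0) →
    (List.range' i k).foldl (stepA d ps) cache = (List.range' i k).foldl (stepB d ps) cache := by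
  intro k
  induction k with
  | zero => intro i cache _ _ _ _; rfl
  | succ k ih =>
    intro i cache hi hk hlen hinv
    rw [List.range'_succ, List.foldl_cons, List.foldl_cons]
    rw [step_eq d ps i cache hi (by omega) (by omega) (hinv i le_rfl (by omega)) hne]
    apply ih (i + 1)
    · omega
    · omega
    · unfold stepB; simp [hlen]
    · intro j hj1 hj2
      unfold stepB
      have hij : i ≠ j := by omega
      have h0 := hinv j (by omega) hj2
      simp only [List.getD] at h0 ⊢
      rw [List.getElem?_set_ne hij]
      exact h0

theorem bridgeA (design : String) (patterns : List String) :
    ways_to_make design patterns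
      = ((List.range' 1 design.toList.length).foldl (stepA design.toList patterns)
          ((List.replicate (design.toList.length + 1) (0 : Int)).set 0 1)).getD design.toList.length 0 := rfl

theorem bridgeB (design : String) (patterns : List String) :
    ways_to_make_alt design patterns
      = ((List.range' 1 design.toList.length).foldl (stepB design.toList patterns)
          ((1 : Int) :: List.replicate design.toList.length 0)).getD design.toList.length 0 := rfl

theorem init_cache_eq (n : Nat) : (List.replicate (n + 1) (0 : Int)).set 0 1 = (1 : Int) :: List.replicate n 0 := by
  simp [List.replicate_succ]

theorem init_zero (n : Nat) : ∀ j, 1 ≤ j → ((1 : Int) :: List.replicate n (0 : Int)).getD j 0 = 0 := by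
  intro j hj
  cases j with
  | zero => omega
  | succ j => simp [List.getD, List.getElem?_replicate]; split <;> rfl

-- ===== VERDICT (by name: the statement is the Claim_ definition above) =====
-- a fold whose step fixes the start state is the identity
theorem foldl_fixed {α β : Type} (l : List α) (f : β → α → β) (c : β)
    (h : ∀ x ∈ l, f c x = c) : l.foldl f c = c := by
  induction l with
  | nil => rfl
  | cons x tl ih =>
    rw [List.foldl_cons, h x List.mem_cons_self]
    exact ih (fun y hy => h y (List.mem_cons_of_mem _ hy))

theorem slN_infix (d : List Char) (i L : Nat) : slN d i L <:+: d :=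
  ((List.take_prefix _ _).isInfix).trans ((List.drop_suffix _ _).isInfix)

-- when no nonempty pattern occurs in the design, A's step leaves the initial cache unchanged
theorem stepA_fixed (d : List Char) (ps : List String) (i : Nat)
    (hi : 1 ≤ i) (hin : i ≤ d.length)
    (hinf : ∀ p ∈ ps, ¬ (p.toList ≠ [] ∧ p.toList <:+: d)) :
    stepA d ps ((1 : Int) :: List.replicate d.length 0) i = (1 : Int) :: List.replicate d.length 0 := by
  unfold stepA
  apply foldl_fixed
  intro p hp
  set c0 : List Int := (1 : Int) :: List.replicate d.length 0 with hc0
  by_cases hcond : p.toList.length ≤ i ∧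
      PySem.List.slice d (some ((i : Int) - (p.toList.length : Int))) (some (i : Int)) = p.toList
  · rw [if_pos hcond]
    have hpe : p.toList = [] := by
      by_contra hne
      exact hinf p hp ⟨hne, by
        rw [slice_eq_slN d i p.toList.length hcond.1] at hcond
        exact hcond.2 ▸ slN_infix d i p.toList.length⟩
    have hiz : c0.getD i 0 = 0 := init_zero d.length i hi
    rw [hpe]
    simp only [List.length_nil, Nat.sub_zero, hiz, add_zero]
    have hilt : i < c0.length := by simp [hc0]; omega
    rw [← hiz, List.getD_eq_getElem _ _ hilt, List.set_getElem_self]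
  · rw [if_neg hcond]

-- and so does B's
theorem stepB_fixed (d : List Char) (ps : List String) (i : Nat)
    (hi : 1 ≤ i) (hin : i ≤ d.length)
    (hinf : ∀ p ∈ ps, ¬ (p.toList ≠ [] ∧ p.toList <:+: d)) :
    stepB d ps ((1 : Int) :: List.replicate d.length 0) i = (1 : Int) :: List.replicate d.length 0 := by
  set c0 : List Int := (1 : Int) :: List.replicate d.length 0 with hc0
  have htot : totalB d ps c0 i = 0 := by
    rw [innerB_sum]
    apply List.sum_eq_zero
    intro x hx
    obtain ⟨L, hL, rfl⟩ := List.mem_map.mp hx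
    have hLr := List.mem_range'_1.mp hL
    rw [slice_eq_slN d i L (by omega)]
    have hcount : (ps.map String.toList).count (slN d i L) = 0 := by
      rw [List.count_eq_zero]
      intro hmem
      obtain ⟨q, hq, hEq⟩ := List.mem_map.mp hmem
      apply hinf q hq
      refine ⟨?_, hEq ▸ slN_infix d i L⟩
      rw [hEq]
      have : (slN d i L).length = L := length_slN d i L (by omega) hin
      intro hnil
      rw [hnil] at this
      simp at this
      omega
    rw [hcount]
    simp
  unfold stepB
  rw [htot]
  have hiz : c0.getD i 0 = 0 := init_zero d.length i hi
  have hilt : i < c0.length := by simp [hc0]; omega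
  rw [← hiz, List.getD_eq_getElem _ _ hilt, List.set_getElem_self]

theorem ways_to_make_spec : Claim_equal_ways_to_make := by
  intro design patterns _ hpre
  unfold Spec_ways_to_make
  rw [bridgeA, bridgeB, init_cache_eq]
  congr 1
  rcases hpre with hpre | hinf
  · apply outer_eq design.toList patterns
    · intro p hp h
      exact hpre (String.toList_eq_nil_iff.mp h ▸ hp)
    · omega
    · omega
    · simp
    · intro j hj _
      exact init_zero design.toList.length j hj
  · rw [foldl_fixed _ _ _ (fun i hi => stepA_fixed design.toList patterns i
        (List.mem_range'_1.mp hi).1 (by have := (List.mem_range'_1.mp hi).2; omega) hinf),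
      foldl_fixed _ _ _ (fun i hi => stepB_fixed design.toList patterns i
        (List.mem_range'_1.mp hi).1 (by have := (List.mem_range'_1.mp hi).2; omega) hinf)]
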